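-- pv_equiv track=rewrite | github.com/e555321e/Clade | backend/app/services/species/niche.py | _habitats_compatible
-- ===== SOURCE A (Python) =====
-- def _habitats_compatible(h1: str, h2: str) -> bool:
--     """检查两个栖息地类型是否兼容"""
--     h1, h2 = h1.lower(), h2.lower()
--
--     # 定义兼容组
--     compatible_groups = [
--         {"marine", "coastal", "deep_sea"},  # 海洋相关
--         {"freshwater", "terrestrial"},       # 淡水-陆地（两栖）
--         {"terrestrial", "aerial"},           # 陆地-空中
--     ]
--
--     for group in compatible_groups:
--         if h1 in group and h2 in group:
--             return True
--     return False
-- ===== SOURCE B (Python) =====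
-- # Precomputed adjacency map: each habitat -> set of all habitats compatible with it.
-- _COMPAT = {}
-- for _group in [
--     {"marine", "coastal", "deep_sea"},
--     {"freshwater", "terrestrial"},
--     {"terrestrial", "aerial"},
-- ]:
--     for _h in _group:
--         _COMPAT[_h] = _COMPAT.get(_h, set()) | _group
--
--
-- def _habitats_compatible(h1: str, h2: str) -> bool:
--     return h2.lower() in _COMPAT.get(h1.lower(), set())
-- ===== Notes on version B (the rewrite author's own statement) =====
-- stated objective: idiomatic
-- what changed: Replaces the per-call loop over compatibility groups with a precomputed habitat->compatible-set adjacency dict (built once, folding the duplicated 'terrestrial' group), so the call is a single lookup plus membership test.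
import Mathlib
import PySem

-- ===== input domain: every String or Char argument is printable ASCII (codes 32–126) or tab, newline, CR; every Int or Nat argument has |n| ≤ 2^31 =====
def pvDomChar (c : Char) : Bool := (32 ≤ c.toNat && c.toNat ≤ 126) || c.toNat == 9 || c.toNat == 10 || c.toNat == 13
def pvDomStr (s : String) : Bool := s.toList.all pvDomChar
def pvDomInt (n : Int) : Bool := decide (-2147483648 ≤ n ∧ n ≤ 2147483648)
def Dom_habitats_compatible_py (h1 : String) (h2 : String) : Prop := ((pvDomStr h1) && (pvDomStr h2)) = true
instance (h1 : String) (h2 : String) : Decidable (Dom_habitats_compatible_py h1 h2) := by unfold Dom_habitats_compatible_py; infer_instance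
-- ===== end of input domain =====

-- B replaces A's per-call loop over compatibility groups by a precomputed habitat -> compatible-set dict (idiomatic, O(1) decision path).

-- ===== PORT A =====
-- the three compatible groups, as in A
def pvGroupsA : List (PySem.Set String) :=
  [PySem.Set.ofList ["marine", "coastal", "deep_sea"],
   PySem.Set.ofList ["freshwater", "terrestrial"],
   PySem.Set.ofList ["terrestrial", "aerial"]]

-- 'for group in compatible_groups: if h1 in group and h2 in group: return True / return False'
def pvLoopA (gs : List (PySem.Set String)) (a b : String) : Bool :=
  match gs with
  | [] => false
  | g :: rest => if PySem.Set.contains g a && PySem.Set.contains g b then true else pvLoopA rest a b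

def habitats_compatible_py (h1 : String) (h2 : String) : Bool :=
  pvLoopA pvGroupsA (PySem.Str.lower h1) (PySem.Str.lower h2)

-- ===== PORT B =====
-- module-level _COMPAT: for each group, for each habitat h in it, _COMPAT[h] = _COMPAT.get(h, set()) | group
def pvCompat : PySem.Dict String (PySem.Set String) :=
  ([PySem.Set.ofList ["marine", "coastal", "deep_sea"],
    PySem.Set.ofList ["freshwater", "terrestrial"],
    PySem.Set.ofList ["terrestrial", "aerial"]] : List (PySem.Set String)).foldl
    (fun d g => g.foldl (fun d h => d.insert h (PySem.Set.union (d.getD h PySem.Set.empty) g)) d)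
    PySem.Dict.empty

def habitats_compatible_py_alt (h1 : String) (h2 : String) : Bool :=
  PySem.Set.contains (pvCompat.getD (PySem.Str.lower h1) PySem.Set.empty) (PySem.Str.lower h2)

-- ===== PRECONDITION & SPEC =====
def Spec_habitats_compatible_py (h1 : String) (h2 : String) (out : Bool) : Prop := out = habitats_compatible_py_alt h1 h2
instance (h1 : String) (h2 : String) (out : Bool) : Decidable (Spec_habitats_compatible_py h1 h2 out) := by unfold Spec_habitats_compatible_py; infer_instance

-- ===== CLAIM (what is proved, stated in full; the proofs are below) =====
def Claim_equal_habitats_compatible_py : Prop := ∀ (h1 : String) (h2 : String), Dom_habitats_compatible_py h1 h2 → Spec_habitats_compatible_py h1 h2 (habitats_compatible_py h1 h2)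

-- ===== LEMMAS AND PROOFS =====

-- pvCompat evaluated: the adjacency dict B builds once
theorem pvCompat_eq : pvCompat = PySem.Dict.mk
    [("marine", ["marine", "coastal", "deep_sea"]),
     ("coastal", ["marine", "coastal", "deep_sea"]),
     ("deep_sea", ["marine", "coastal", "deep_sea"]),
     ("freshwater", ["freshwater", "terrestrial"]),
     ("terrestrial", ["freshwater", "terrestrial", "aerial"]),
     ("aerial", ["terrestrial", "aerial"])] := by decide

-- core agreement on the already-lowered strings
set_option maxRecDepth 8192 in
theorem pv_core_eq (a b : String) :
    pvLoopA pvGroupsA a b = PySem.Set.contains (pvCompat.getD a PySem.Set.empty) b := by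
  rw [pvCompat_eq]
  by_cases h1 : a = "marine" <;> by_cases h2 : a = "coastal" <;> by_cases h3 : a = "deep_sea" <;>
    by_cases h4 : a = "freshwater" <;> by_cases h5 : a = "terrestrial" <;> by_cases h6 : a = "aerial" <;>
    simp_all [pvLoopA, pvGroupsA, PySem.Dict.getD, PySem.Dict.get?_mk_cons, PySem.Set.contains,
      PySem.Set.ofList, PySem.Set.add] <;>
    (try (by_cases hb : b = "terrestrial" <;> simp_all)) <;>
    simp_all [eq_comm] <;> simp [PySem.Dict.get?]

-- ===== VERDICT (by name: the statement is the Claim_ definition above) =====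
theorem habitats_compatible_py_spec : Claim_equal_habitats_compatible_py := by
  intro h1 h2 _
  unfold Spec_habitats_compatible_py habitats_compatible_py habitats_compatible_py_alt
  exact pv_core_eq _ _
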